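-- pv_equiv track=rewrite | github.com/11lcb/python-class-assignment | 11.13  2025 lab4  演示-2.py | calculate_total_points
-- ===== SOURCE A (Python) =====
-- def calculate_total_points(selected_items, all_items, initial_points):
--     """计算总生存点数"""
--     total = initial_points
--
--     # 所有物品的ID集合
--     all_ids = {item["id"] for item in all_items}
--     # 已选物品的ID集合
--     selected_ids = {item["id"] for item in selected_items}
--
--     # 计算总生存点数：已选物品加分，未选物品减分
--     for item in all_items:
--         if item["id"] in selected_ids:
--             total += item["points"]
--         else:
--             total -= item["points"]
--
--     return total
-- ===== SOURCE B (Python) =====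
-- def calculate_total_points(selected_items, all_items, initial_points):
--     # Aggregate the points of all_items per id (insertion-ordered dict),
--     # then apply the +/- sign once per distinct id.
--     by_id = {}
--     for item in all_items:
--         by_id[item["id"]] = by_id.get(item["id"], 0) + item["points"]
--     selected_ids = {item["id"] for item in selected_items}
--     total = initial_points
--     for id_, pts in by_id.items():
--         if id_ in selected_ids:
--             total += pts
--         else:
--             total -= pts
--     return total
-- ===== Notes on version B (the rewrite author's own statement) =====
-- stated objective: alternative
-- what changed: B first groups all_items' points per id into an insertion-ordered dict (one aggregation pass), then applies the add/subtract sign once per distinct id over the grouped entries, instead of A's per-occurrence branch; correct because the sign depends only on the id.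
import Mathlib
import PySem

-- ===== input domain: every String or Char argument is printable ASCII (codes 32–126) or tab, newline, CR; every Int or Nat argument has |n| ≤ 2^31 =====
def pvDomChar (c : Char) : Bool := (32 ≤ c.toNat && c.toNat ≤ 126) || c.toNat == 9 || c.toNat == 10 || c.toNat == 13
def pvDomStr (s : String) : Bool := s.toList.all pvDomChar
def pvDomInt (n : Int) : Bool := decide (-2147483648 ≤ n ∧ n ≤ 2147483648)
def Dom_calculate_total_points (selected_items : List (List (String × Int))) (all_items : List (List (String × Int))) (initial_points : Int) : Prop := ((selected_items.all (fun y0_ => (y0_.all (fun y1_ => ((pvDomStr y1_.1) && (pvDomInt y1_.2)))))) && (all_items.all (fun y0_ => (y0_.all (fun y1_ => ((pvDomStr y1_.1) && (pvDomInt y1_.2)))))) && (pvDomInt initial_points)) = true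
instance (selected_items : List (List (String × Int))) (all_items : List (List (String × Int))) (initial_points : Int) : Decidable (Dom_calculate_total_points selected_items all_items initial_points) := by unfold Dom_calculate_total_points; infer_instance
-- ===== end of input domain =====

-- B groups all_items' points per id into a dict first, then applies the +/- sign once per
-- distinct id over the grouped entries (A branches per occurrence); same asymptotic cost.


-- item["k"]: first-match lookup; total form, used only under Pre_ (key present)
def pvKey (d : List (String × Int)) (k : String) : Int :=
  ((PySem.Dict.mk d).get? k).getD 0

-- ===== PORT A =====
def calculate_total_points (selected_items : List (List (String × Int))) (all_items : List (List (String × Int))) (initial_points : Int) : Int :=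
  let total := initial_points
  -- all_ids is built by A but never used; its construction cannot fail under Pre_, so it is omitted
  let selected_ids : PySem.Set Int :=
    selected_items.foldl (fun s it => PySem.Set.add s (pvKey it "id")) PySem.Set.empty
  all_items.foldl
    (fun t it =>
      if PySem.Set.contains selected_ids (pvKey it "id") then t + pvKey it "points"
      else t - pvKey it "points")
    total

-- ===== PORT B =====
def calculate_total_points_alt (selected_items : List (List (String × Int))) (all_items : List (List (String × Int))) (initial_points : Int) : Int :=
  let by_id : PySem.Dict Int Int :=
    all_items.foldl (fun d it => d.modify (pvKey it "id") 0 (· + pvKey it "points")) PySem.Dict.empty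
  let selected_ids : PySem.Set Int := PySem.Set.ofList (selected_items.map (fun it => pvKey it "id"))
  by_id.items.foldl
    (fun t p => if PySem.Set.contains selected_ids p.1 then t + p.2 else t - p.2)
    initial_points

-- ===== PRECONDITION & SPEC =====
-- Pre_ excludes exactly the inputs where a dict lacks the accessed key ("id", or "points" in
-- all_items), on which the Python A raises KeyError (B raises there too).
def Pre_calculate_total_points (selected_items : List (List (String × Int))) (all_items : List (List (String × Int))) (initial_points : Int) : Prop :=
  (∀ it ∈ selected_items, ((PySem.Dict.mk it).get? "id").isSome) ∧
  (∀ it ∈ all_items, ((PySem.Dict.mk it).get? "id").isSome ∧ ((PySem.Dict.mk it).get? "points").isSome)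
instance (selected_items : List (List (String × Int))) (all_items : List (List (String × Int))) (initial_points : Int) : Decidable (Pre_calculate_total_points selected_items all_items initial_points) := by unfold Pre_calculate_total_points; infer_instance

def pvWitness_calculate_total_points : (List (List (String × Int))) × (List (List (String × Int))) × Int :=
  ([[("id", 1)]], [[("id", 1), ("points", 5)], [("id", 2), ("points", 3)]], 0)

def Spec_calculate_total_points (selected_items : List (List (String × Int))) (all_items : List (List (String × Int))) (initial_points : Int) (out : Int) : Prop := out = calculate_total_points_alt selected_items all_items initial_points
instance (selected_items : List (List (String × Int))) (all_items : List (List (String × Int))) (initial_points : Int) (out : Int) : Decidable (Spec_calculate_total_points selected_items all_items initial_points out) := by unfold Spec_calculate_total_points; infer_instance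

-- ===== CLAIM =====
def Claim_equal_calculate_total_points : Prop := ∀ (selected_items : List (List (String × Int))) (all_items : List (List (String × Int))) (initial_points : Int), Dom_calculate_total_points selected_items all_items initial_points → Pre_calculate_total_points selected_items all_items initial_points → Spec_calculate_total_points selected_items all_items initial_points (calculate_total_points selected_items all_items initial_points)

-- ===== LEMMAS AND PROOFS =====

-- a ± fold is the initial value plus a signed sum
theorem pv_fold_signed {α : Type} (c : α → Bool) (p : α → Int) (l : List α) (t : Int) :
    l.foldl (fun t x => if c x then t + p x else t - p x) t
      = t + (l.map (fun x => (if c x then (1 : Int) else -1) * p x)).sum := by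
  induction l generalizing t with
  | nil => simp
  | cons hd tl ih => by_cases h : c hd = true <;> simp [h, ih] <;> ring

-- getD of the grouping fold: base value plus the sum of p over the matching elements
theorem pv_getD_group {α : Type} (key : α → Int) (p : α → Int) (l : List α)
    (d : PySem.Dict Int Int) (v : Int) :
    (l.foldl (fun d x => d.modify (key x) 0 (· + p x)) d).getD v 0
      = d.getD v 0 + ((l.filter (fun x => key x == v)).map p).sum := by
  induction l generalizing d with
  | nil => simp
  | cons hd tl ih =>
    simp only [List.foldl_cons, List.filter_cons, ih]
    by_cases h : key hd = v
    · simp [h, PySem.Dict.getD_modify_self]; ring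
    · simp [h, PySem.Dict.getD_modify, Ne.symm h]

-- splitting a sum by a predicate
theorem pv_sum_split {α : Type} (p : α → Int) (c : α → Bool) (l : List α) :
    (l.map p).sum
      = ((l.filter c).map p).sum + ((l.filter (fun x => !c x)).map p).sum := by
  induction l with
  | nil => simp
  | cons hd tl ih => by_cases h : c hd = true <;> simp [h, ih] <;> ring

-- sum over groups (indexed by a nodup key list covering l) equals the plain sum
theorem pv_group_sum {α : Type} (key : α → Int) (f : α → Int) :
    ∀ (D : List Int) (l : List α), D.Nodup → (∀ x ∈ l, key x ∈ D) →
    (D.map (fun k => ((l.filter (fun x => key x == k)).map f).sum)).sum = (l.map f).sum := by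
  intro D
  induction D with
  | nil =>
    intro l _ hcov
    cases l with
    | nil => simp
    | cons hd tl => exact absurd (hcov hd (by simp)) (by simp)
  | cons k D' ih =>
    intro l hnd hcov
    simp only [List.map_cons, List.sum_cons]
    have hk : k ∉ D' := (List.nodup_cons.mp hnd).1
    have hstep : ∀ k' ∈ D',
        (l.filter (fun x => key x == k')).map f
          = ((l.filter (fun x => !(key x == k))).filter (fun x => key x == k')).map f := by
      intro k' hk'
      rw [List.filter_filter]
      congr 1
      apply List.filter_congr
      intro x _
      have hkk : k' ≠ k := by rintro rfl; exact hk hk'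
      by_cases h : key x = k'
      · simp [h, hkk]
      · simp [h]
    have hmaps : (D'.map (fun k' => ((l.filter (fun x => key x == k')).map f).sum))
        = (D'.map (fun k' => (((l.filter (fun x => !(key x == k))).filter (fun x => key x == k')).map f).sum)) := by
      apply List.map_congr_left
      intro k' hk'
      rw [hstep k' hk']
    rw [hmaps, ih (l.filter (fun x => !(key x == k))) (List.nodup_cons.mp hnd).2
      (by intro x hx
          have hmem := List.mem_filter.mp hx
          have := hcov x hmem.1
          simp only [List.mem_cons] at this
          rcases this with h | h
          · exfalso; simp [h] at hmem
          · exact h)]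
    rw [pv_sum_split f (fun x => key x == k) l]

theorem pv_regroup {α : Type} (s : Int → Bool) (key p : α → Int) (l : List α) :
    (((l.foldl (fun d x => d.modify (key x) 0 (· + p x)) PySem.Dict.empty).items).map
        (fun q : Int × Int => (if s q.1 then (1:Int) else -1) * q.2)).sum
      = (l.map (fun x => (if s (key x) then (1:Int) else -1) * p x)).sum := by
  set d : PySem.Dict Int Int :=
    l.foldl (fun d x => d.modify (key x) 0 (· + p x)) PySem.Dict.empty with hd
  have hkeys : d.keys = PySem.Set.ofList (l.map key) := by
    rw [hd, PySem.Dict.keys_foldl_modify_key]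
    simp [PySem.Set.update_nil_left]
  have hnd : d.keys.Nodup := by rw [hkeys]; exact PySem.Set.nodup_ofList _
  rw [PySem.Dict.items_eq_map_keys d hnd 0, List.map_map, hkeys]
  have hval : ∀ k : Int, d.getD k 0 = ((l.filter (fun x => key x == k)).map p).sum := by
    intro k; rw [hd, pv_getD_group]; simp
  have hmapeq :
      (PySem.Set.ofList (l.map key)).map
        ((fun q : Int × Int => (if s q.1 then (1:Int) else -1) * q.2)
          ∘ (fun k => (k, d.getD k 0)))
      = (PySem.Set.ofList (l.map key)).map
          (fun k => ((l.filter (fun x => key x == k)).map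
            (fun x => (if s (key x) then (1:Int) else -1) * p x)).sum) := by
    apply List.map_congr_left; intro k _
    simp only [Function.comp, hval k]
    rw [← List.sum_map_mul_left]
    apply congrArg List.sum
    apply List.map_congr_left
    intro x hx
    have hxk : key x = k := by simpa using (List.mem_filter.mp hx).2
    rw [hxk]
  rw [hmapeq]
  exact pv_group_sum key (fun x => (if s (key x) then (1:Int) else -1) * p x)
      (PySem.Set.ofList (l.map key)) l (PySem.Set.nodup_ofList _)
      (by intro x hx; rw [PySem.Set.mem_ofList]; exact List.mem_map_of_mem hx)

theorem calculate_total_points_eq (selected_items all_items : List (List (String × Int))) (initial_points : Int) :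
    calculate_total_points selected_items all_items initial_points
      = calculate_total_points_alt selected_items all_items initial_points := by
  simp only [calculate_total_points, calculate_total_points_alt]
  rw [PySem.Set.ofList_eq_foldl, List.foldl_map]
  simp only [PySem.Set.empty]
  refine (pv_fold_signed
        (fun it => PySem.Set.contains
          (selected_items.foldl (fun s it => PySem.Set.add s (pvKey it "id")) ([] : PySem.Set Int))
          (pvKey it "id"))
        (fun it => pvKey it "points") all_items initial_points).trans ?_
  refine Eq.trans ?_ (pv_fold_signed
        (fun q : Int × Int => PySem.Set.contains
          (selected_items.foldl (fun s it => PySem.Set.add s (pvKey it "id")) ([] : PySem.Set Int)) q.1)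
        (fun q : Int × Int => q.2) _ initial_points).symm
  congr 1
  exact (pv_regroup
    (fun k => PySem.Set.contains
      (selected_items.foldl (fun s it => PySem.Set.add s (pvKey it "id")) ([] : PySem.Set Int)) k)
    (fun it => pvKey it "id") (fun it => pvKey it "points") all_items).symm

-- ===== VERDICT =====
theorem calculate_total_points_spec : Claim_equal_calculate_total_points := by
  intro sel al ip _ _
  exact calculate_total_points_eq sel al ip
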